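-- pv_equiv track=rewrite | github.com/GenryEden/kpolyakovName | 460.py | f
-- ===== SOURCE A (Python) =====
-- def f(x):
-- 	if x < 1:
-- 		return 0
-- 	elif x == 1:
-- 		return 1
-- 	elif x == 10:
-- 		return 0
-- 	else:
-- 		ans = f(x-1)
-- 		if x % 2 == 0:
-- 			if not(x//2 < 25 < x):
-- 				ans += f(x//2)
-- 		return ans
-- ===== SOURCE B (Python) =====
-- def f(x):
--     if x < 1:
--         return 0
--     vals = [0, 1]  # vals[i] = f(i), bottom-up
--     for i in range(2, x + 1):
--         if i == 10:
--             v = 0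
--         else:
--             v = vals[i - 1]
--             if i % 2 == 0 and not (i // 2 < 25 < i):
--                 v += vals[i // 2]
--         vals.append(v)
--     return vals[x]
-- ===== Notes on version B (the rewrite author's own statement) =====
-- stated objective: faster
-- what changed: A's naive recursion f(x-1)+f(x//2) (recomputing subproblems exponentially often) is replaced by a bottom-up dynamic-programming table over 1..x filled in one pass; Pre_ bounds x because beyond CPython's recursion limit A's depth-x call chain raises RecursionError.
import Mathlib
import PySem

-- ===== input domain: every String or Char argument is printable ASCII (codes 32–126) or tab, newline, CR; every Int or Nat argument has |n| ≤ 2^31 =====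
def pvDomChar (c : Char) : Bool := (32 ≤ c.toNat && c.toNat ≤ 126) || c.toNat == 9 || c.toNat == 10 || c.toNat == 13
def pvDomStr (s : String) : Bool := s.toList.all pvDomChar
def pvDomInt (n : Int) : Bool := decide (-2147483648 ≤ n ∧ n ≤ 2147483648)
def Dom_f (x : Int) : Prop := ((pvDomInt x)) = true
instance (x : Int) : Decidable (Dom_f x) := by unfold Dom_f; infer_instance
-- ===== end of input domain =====

-- B replaces A's naive recursion by a bottom-up table over 1..x (objective: faster, asymptotic).

-- ===== PORT A =====
-- literal port of A's recursion; well-founded on x.toNat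
def f (x : Int) : Int :=
  if x < 1 then 0
  else if x = 1 then 1
  else if x = 10 then 0
  else
    let ans := f (x - 1)
    if PySem.Int.mod x 2 = 0 then
      if ¬ (PySem.Int.floordiv x 2 < 25 ∧ 25 < x) then ans + f (PySem.Int.floordiv x 2)
      else ans
    else ans
termination_by x.toNat
decreasing_by
  · omega
  · have h2 : PySem.Int.floordiv x 2 = x / 2 := PySem.Int.floordiv_eq_ediv_of_pos (by omega)
    rw [h2]; omega

-- ===== PORT B =====
-- the loop 'for i in range(2, x+1)' appending to vals, as structural recursion on the
-- iteration count: fBuild k = vals after the iterations i = 2 .. k+1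
def fBuild : Nat → List Int
  | 0 => [0, 1]
  | k + 1 =>
    let vals := fBuild k
    let i : Int := (k : Int) + 2
    let v : Int :=
      if i = 10 then 0
      else
        let v0 := vals.getD (i - 1).toNat 0    -- vals[i-1]; index in range, exact
        if PySem.Int.mod i 2 = 0 ∧ ¬ (PySem.Int.floordiv i 2 < 25 ∧ 25 < i) then
          v0 + vals.getD (PySem.Int.floordiv i 2).toNat 0
        else v0
    vals ++ [v]

def f_alt (x : Int) : Int :=
  if x < 1 then 0
  else (fBuild (x.toNat - 1)).getD x.toNat 0

-- ===== PRECONDITION & SPEC =====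
-- Pre_ bounds x: for larger x, A's depth-x call chain f(x) -> f(x-1) -> ... overruns CPython's
-- default recursion limit and raises RecursionError; the bound leaves margin for the caller's
-- own stack frames.
def Pre_f (x : Int) : Prop := x ≤ 950
instance (x : Int) : Decidable (Pre_f x) := by unfold Pre_f; infer_instance
def pvWitness_f : Int := (30)
def Spec_f (x : Int) (out : Int) : Prop := out = f_alt x
instance (x : Int) (out : Int) : Decidable (Spec_f x out) := by unfold Spec_f; infer_instance

-- ===== CLAIM (what is proved, stated in full; the proofs are below) =====
def Claim_equal_f : Prop := ∀ (x : Int), Dom_f x → Pre_f x → Spec_f x (f x)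

-- ===== LEMMAS AND PROOFS =====

theorem fBuild_length (k : Nat) : (fBuild k).length = k + 2 := by
  induction k with
  | zero => rfl
  | succ k ih => simp [fBuild, ih]

theorem getD_append_left (l l' : List Int) (n : Nat) (h : n < l.length) :
    (l ++ l').getD n 0 = l.getD n 0 := by
  simp [List.getD, List.getElem?_append_left h]

theorem getD_append_last (l : List Int) (v : Int) :
    (l ++ [v]).getD l.length 0 = v := by
  simp [List.getD]

theorem f_step (i : Int) (h1 : ¬ i < 1) (h2 : i ≠ 1) (h3 : i ≠ 10) :
    f i = (if PySem.Int.mod i 2 = 0 ∧ ¬ (PySem.Int.floordiv i 2 < 25 ∧ 25 < i) then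
            f (i - 1) + f (PySem.Int.floordiv i 2) else f (i - 1)) := by
  rw [f, if_neg h1, if_neg h2, if_neg h3]
  by_cases hm : PySem.Int.mod i 2 = 0
  · rw [if_pos hm]
    by_cases hc : ¬ (PySem.Int.floordiv i 2 < 25 ∧ 25 < i)
    · rw [if_pos hc, if_pos ⟨hm, hc⟩]
    · rw [if_neg hc, if_neg (by tauto)]
  · rw [if_neg hm, if_neg (by tauto)]

theorem fBuild_invariant (k : Nat) :
    ∀ j : Nat, j ≤ k + 1 → (fBuild k).getD j 0 = f (j : Int) := by
  induction k with
  | zero =>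
    intro j hj
    interval_cases j
    · rw [f]; norm_num [fBuild]
    · rw [f]; norm_num [fBuild]
  | succ k ih =>
    intro j hj
    have hlen : (fBuild k).length = k + 2 := fBuild_length k
    rcases Nat.lt_or_ge j (k + 2) with h | h
    · -- index falls in the old table
      show ((fBuild k) ++ _).getD j 0 = _
      rw [getD_append_left _ _ _ (by omega)]
      exact ih j (by omega)
    · -- j = k + 2 : the freshly appended entry
      have hj2 : j = k + 2 := by omega
      subst hj2
      show ((fBuild k) ++ [_]).getD (k + 2) 0 = _
      conv_lhs => rw [show k + 2 = (fBuild k).length from hlen.symm]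
      rw [getD_append_last,
        show ((k + 2 : Nat) : Int) = (k : Int) + 2 by push_cast; ring]
      by_cases h10 : ((k : Int) + 2) = 10
      · rw [if_pos h10, h10, f]
        norm_num
      · rw [if_neg h10, f_step ((k : Int) + 2) (by omega) (by omega) h10]
        have e1 : (fBuild k).getD ((((k : Int) + 2) - 1).toNat) 0
            = f (((k : Int) + 2) - 1) := by
          rw [show ((((k : Int) + 2)) - 1).toNat = k + 1 by omega,
            ih (k + 1) (by omega), show ((k + 1 : Nat) : Int) = ((k : Int) + 2) - 1 by push_cast; ring]
        have e2 : (fBuild k).getD ((PySem.Int.floordiv ((k : Int) + 2) 2).toNat) 0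
            = f (PySem.Int.floordiv ((k : Int) + 2) 2) := by
          rw [show PySem.Int.floordiv ((k : Int) + 2) 2 = (((k + 2) / 2 : Nat) : Int) by
              rw [show (k : Int) + 2 = ((k + 2 : Nat) : Int) by push_cast; ring]
              exact_mod_cast PySem.Int.floordiv_natCast (k + 2) 2,
            Int.toNat_natCast, ih ((k + 2) / 2) (by omega)]
        show (if PySem.Int.mod ((k : Int) + 2) 2 = 0 ∧
              ¬ (PySem.Int.floordiv ((k : Int) + 2) 2 < 25 ∧ 25 < ((k : Int) + 2)) then
            (fBuild k).getD ((((k : Int) + 2) - 1).toNat) 0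
              + (fBuild k).getD ((PySem.Int.floordiv ((k : Int) + 2) 2).toNat) 0
          else (fBuild k).getD ((((k : Int) + 2) - 1).toNat) 0) = _
        by_cases hc : PySem.Int.mod ((k : Int) + 2) 2 = 0 ∧
            ¬ (PySem.Int.floordiv ((k : Int) + 2) 2 < 25 ∧ 25 < ((k : Int) + 2))
        · rw [if_pos hc, if_pos hc, e1, e2]
        · rw [if_neg hc, if_neg hc, e1]

theorem f_spec : Claim_equal_f := by
  intro x _ _
  unfold Spec_f f_alt
  by_cases h : x < 1
  · rw [if_pos h]; rw [f]; simp [h]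
  · rw [if_neg h]
    have hx : x = (x.toNat : Int) := by omega
    have : x.toNat ≤ (x.toNat - 1) + 1 := by omega
    rw [fBuild_invariant (x.toNat - 1) x.toNat this, ← hx]
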